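-- pv_equiv track=rewrite | github.com/SKALEZ-A/Personalized-medic | core/advanced_monitoring.py | _detect_log_anomaly
-- ===== SOURCE A (Python) =====
-- from typing import Dict, List, Any, Optional, Callable, Union
--
-- def _detect_log_anomaly(log_entry: Dict[str, Any]) -> bool:
--     """Detect if log entry is anomalous"""
--     # Simple anomaly detection based on error patterns
--     if log_entry.get("level") == "ERROR":
--         error_message = log_entry.get("message", "").lower()
--         error_patterns = ["exception", "failed", "timeout", "connection refused", "unauthorized"]
--
--         for pattern in error_patterns:
--             if pattern in error_message:
--                 return True
--
--     return False
-- ===== SOURCE B (Python) =====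
-- # Single left-to-right position scan of the message; a first-character dispatch dict
-- # (the five patterns have pairwise-distinct first letters) selects at most one pattern
-- # to test with startswith at each position, so the per-pattern substring scans disappear.
-- _BY_FIRST_CHAR = {p[0]: p for p in
--                   ["exception", "failed", "timeout", "connection refused", "unauthorized"]}
--
-- def _detect_log_anomaly(log_entry):
--     """Detect if log entry is anomalous"""
--     if log_entry.get("level") != "ERROR":
--         return False
--     message = log_entry.get("message", "").lower()
--     for i, ch in enumerate(message):
--         pattern = _BY_FIRST_CHAR.get(ch)
--         if pattern is not None and message.startswith(pattern, i):
--             return True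
--     return False
-- ===== Notes on version B (the rewrite author's own statement) =====
-- stated objective: alternative
-- what changed: Replaces A's pattern-driven loop of five separate substring scans with a single position-driven scan of the message that uses a first-character dispatch dictionary (the five patterns have distinct first letters) to test at most one startswith per position, removing the inner per-pattern scan.
import Mathlib
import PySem

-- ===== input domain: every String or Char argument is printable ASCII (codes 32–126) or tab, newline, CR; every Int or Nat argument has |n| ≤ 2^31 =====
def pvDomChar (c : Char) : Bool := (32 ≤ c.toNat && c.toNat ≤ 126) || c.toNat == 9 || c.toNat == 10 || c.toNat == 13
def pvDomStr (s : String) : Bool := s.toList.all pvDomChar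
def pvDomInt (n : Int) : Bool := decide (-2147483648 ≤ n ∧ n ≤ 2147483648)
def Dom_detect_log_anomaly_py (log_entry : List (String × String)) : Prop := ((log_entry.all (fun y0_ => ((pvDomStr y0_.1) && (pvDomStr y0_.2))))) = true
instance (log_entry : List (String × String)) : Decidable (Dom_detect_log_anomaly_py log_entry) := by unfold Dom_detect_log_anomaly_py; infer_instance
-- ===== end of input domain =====

-- B replaces A's pattern-driven loop of five substring scans by one position-driven pass
-- of the message with a first-character dispatch table (alternative decomposition).

-- ===== PORT A =====
-- the 'for pattern in error_patterns: if pattern in error_message: return True' loop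
def pvALoop (pats : List String) (msg : String) : Bool :=
  match pats with
  | [] => false
  | p :: rest => if PySem.Str.isIn p msg then true else pvALoop rest msg

def detect_log_anomaly_py (log_entry : List (String × String)) : Bool :=
  let d := PySem.Dict.mk log_entry
  if d.get? "level" == some "ERROR" then
    let error_message := PySem.Str.lower (d.getD "message" "")
    pvALoop ["exception", "failed", "timeout", "connection refused", "unauthorized"] error_message
  else
    false

-- ===== PORT B =====
-- _BY_FIRST_CHAR: Python dict from the pattern's first character (a 1-char str, here Char)
-- to the pattern; built once from the same five patterns.
def pvByFirstChar : PySem.Dict Char (List Char) :=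
  PySem.Dict.mk ((["exception", "failed", "timeout", "connection refused", "unauthorized"].map
    String.toList).map (fun p => (p.headD ' ', p)))

-- the 'for i, ch in enumerate(message): …' loop: at each position look the current char up
-- in the dispatch dict and, if a pattern is found, test message.startswith(pattern, i)
-- (= the pattern is a prefix of the suffix starting at i).
def pvScan : List Char → Bool
  | [] => false
  | c :: rest =>
      (match pvByFirstChar.get? c with
       | some p => p.isPrefixOf (c :: rest)
       | none => false) || pvScan rest

def detect_log_anomaly_py_alt (log_entry : List (String × String)) : Bool :=
  let d := PySem.Dict.mk log_entry
  if !(d.get? "level" == some "ERROR") then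
    false
  else
    pvScan (PySem.Str.lower (d.getD "message" "")).toList

-- ===== PRECONDITION & SPEC =====
def Spec_detect_log_anomaly_py (log_entry : List (String × String)) (out : Bool) : Prop := out = detect_log_anomaly_py_alt log_entry
instance (log_entry : List (String × String)) (out : Bool) : Decidable (Spec_detect_log_anomaly_py log_entry out) := by unfold Spec_detect_log_anomaly_py; infer_instance

-- ===== CLAIM (what is proved, stated in full; the proofs are below) =====
def Claim_equal_detect_log_anomaly_py : Prop := ∀ (log_entry : List (String × String)), Dom_detect_log_anomaly_py log_entry → Spec_detect_log_anomaly_py log_entry (detect_log_anomaly_py log_entry)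

-- ===== LEMMAS AND PROOFS =====

-- the five patterns as character lists (pvPats = the port's pattern list, character-wise)
def pvPats : List (List Char) :=
  [['e', 'x', 'c', 'e', 'p', 't', 'i', 'o', 'n'],
   ['f', 'a', 'i', 'l', 'e', 'd'],
   ['t', 'i', 'm', 'e', 'o', 'u', 't'],
   ['c', 'o', 'n', 'n', 'e', 'c', 't', 'i', 'o', 'n', ' ', 'r', 'e', 'f', 'u', 's', 'e', 'd'],
   ['u', 'n', 'a', 'u', 't', 'h', 'o', 'r', 'i', 'z', 'e', 'd']]

-- the dispatch step at one position tests exactly 'some pattern is a prefix here'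
-- (correct because the five patterns have pairwise distinct first characters)
theorem pvStep_iff (c : Char) (rest : List Char) :
    (match pvByFirstChar.get? c with
     | some p => p.isPrefixOf (c :: rest)
     | none => false) = true ↔ ∃ p ∈ pvPats, p <+: (c :: rest) := by
  constructor
  · intro h
    by_cases he : c = 'e'
    · subst he
      refine ⟨['e', 'x', 'c', 'e', 'p', 't', 'i', 'o', 'n'], by decide, ?_⟩
      simpa [pvByFirstChar, PySem.Dict.mk, PySem.Dict.get?, List.isPrefixOf_iff_prefix] using h
    · by_cases hf : c = 'f'
      · subst hf
        refine ⟨['f', 'a', 'i', 'l', 'e', 'd'], by decide, ?_⟩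
        simpa [pvByFirstChar, PySem.Dict.mk, PySem.Dict.get?, List.isPrefixOf_iff_prefix] using h
      · by_cases ht : c = 't'
        · subst ht
          refine ⟨['t', 'i', 'm', 'e', 'o', 'u', 't'], by decide, ?_⟩
          simpa [pvByFirstChar, PySem.Dict.mk, PySem.Dict.get?, List.isPrefixOf_iff_prefix] using h
        · by_cases hc : c = 'c'
          · subst hc
            refine ⟨['c', 'o', 'n', 'n', 'e', 'c', 't', 'i', 'o', 'n', ' ', 'r', 'e', 'f', 'u', 's', 'e', 'd'], by decide, ?_⟩
            simpa [pvByFirstChar, PySem.Dict.mk, PySem.Dict.get?, List.isPrefixOf_iff_prefix] using h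
          · by_cases hu : c = 'u'
            · subst hu
              refine ⟨['u', 'n', 'a', 'u', 't', 'h', 'o', 'r', 'i', 'z', 'e', 'd'], by decide, ?_⟩
              simpa [pvByFirstChar, PySem.Dict.mk, PySem.Dict.get?, List.isPrefixOf_iff_prefix] using h
            · exfalso
              have he' : ('e' == c) = false := by simpa using fun hx => he hx.symm
              have hf' : ('f' == c) = false := by simpa using fun hx => hf hx.symm
              have ht' : ('t' == c) = false := by simpa using fun hx => ht hx.symm
              have hc' : ('c' == c) = false := by simpa using fun hx => hc hx.symm
              have hu' : ('u' == c) = false := by simpa using fun hx => hu hx.symm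
              simp [pvByFirstChar, PySem.Dict.get?, List.find?,
                he', hf', ht', hc', hu'] at h
  · rintro ⟨p, hp, hpre⟩
    fin_cases hp <;>
      · rcases (List.cons_prefix_cons.mp hpre) with ⟨hch, -⟩
        subst hch
        simpa [pvByFirstChar, PySem.Dict.mk, PySem.Dict.get?, List.isPrefixOf_iff_prefix] using hpre

-- the single position scan finds exactly the messages having some pattern as an infix
theorem pvScan_eq_true_iff (s : List Char) :
    pvScan s = true ↔ ∃ p ∈ pvPats, p <:+: s := by
  induction s with
  | nil =>
      refine iff_of_false (by simp [pvScan]) ?_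
      rintro ⟨p, hp, hinf⟩
      rw [List.infix_nil] at hinf
      subst hinf
      simp [pvPats] at hp
  | cons c rest ih =>
      simp only [pvScan, Bool.or_eq_true, pvStep_iff, ih]
      constructor
      · rintro (⟨p, hp, hpre⟩ | ⟨p, hp, hinf⟩)
        · exact ⟨p, hp, hpre.isInfix⟩
        · exact ⟨p, hp, hinf.trans (List.suffix_cons c rest).isInfix⟩
      · rintro ⟨p, hp, hinf⟩
        rcases List.infix_cons_iff.mp hinf with h | h
        · exact Or.inl ⟨p, hp, h⟩
        · exact Or.inr ⟨p, hp, h⟩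

-- A's loop finds exactly the messages having some pattern as an infix
theorem pvALoop_eq_true_iff (pats : List String) (msg : String) :
    pvALoop pats msg = true ↔ ∃ p ∈ pats, p.toList <:+: msg.toList := by
  induction pats with
  | nil => simp [pvALoop]
  | cons p rest ih =>
      have h' := PySem.Str.isIn_iff_infix p msg
      by_cases h : PySem.Str.isIn p msg = true
      · rw [pvALoop, if_pos h]
        exact iff_of_true rfl ⟨p, List.mem_cons_self, h'.mp h⟩
      · have hni := (not_iff_not.mpr h').mp h
        simp only [pvALoop, if_neg h, ih, List.mem_cons]
        constructor
        · rintro ⟨q, hq, hi⟩; exact ⟨q, Or.inr hq, hi⟩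
        · rintro ⟨q, hq | hq, hi⟩
          · exact absurd (hq ▸ hi) hni
          · exact ⟨q, hq, hi⟩

-- ===== VERDICT (by name: the statement is the Claim_ definition above) =====
theorem detect_log_anomaly_py_spec : Claim_equal_detect_log_anomaly_py := by
  intro log_entry _
  unfold Spec_detect_log_anomaly_py detect_log_anomaly_py detect_log_anomaly_py_alt
  by_cases h : (PySem.Dict.mk log_entry).get? "level" == some "ERROR"
  · simp only [h, if_true, Bool.not_true, Bool.false_eq_true, if_false]
    rw [Bool.eq_iff_iff, pvALoop_eq_true_iff, pvScan_eq_true_iff]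
    constructor
    · rintro ⟨p, hp, hi⟩
      refine ⟨p.toList, ?_, hi⟩
      fin_cases hp <;> decide
    · rintro ⟨p, hp, hi⟩
      fin_cases hp
      · exact ⟨"exception", by decide, hi⟩
      · exact ⟨"failed", by decide, hi⟩
      · exact ⟨"timeout", by decide, hi⟩
      · exact ⟨"connection refused", by decide, hi⟩
      · exact ⟨"unauthorized", by decide, hi⟩
  · simp [h]
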